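-- pv_equiv track=rewrite | github.com/mhalle/ia-utils | src/ia_utils/commands/search_ia.py | _expand_fields
-- ===== SOURCE A (Python) =====
-- from typing import Iterable, List, Dict, Any, Tuple
--
-- def _expand_fields(fields: List[str], results: List[Dict[str, Any]]) -> List[str]:
--     """Expand wildcard '*' into actual metadata keys preserving order."""
--     if '*' not in fields:
--         return fields
--
--     expanded: List[str] = [field for field in fields if field != '*']
--     seen = set(expanded)
--     for item in results:
--         for key in item.keys():
--             if key not in seen:
--                 expanded.append(key)
--                 seen.add(key)
--     return expanded
-- ===== SOURCE B (Python) =====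
-- def _expand_fields(fields, results):
--     """Expand wildcard '*' into actual metadata keys preserving order."""
--     if '*' not in fields:
--         return fields
--     base = [field for field in fields if field != '*']
--     stream = [key for item in results for key in item]
--     new_keys = set(stream) - set(base)
--     return base + sorted(new_keys, key=stream.index)
-- ===== Notes on version B (the rewrite author's own statement) =====
-- stated objective: alternative
-- what changed: A scans the key stream once with a mutated 'seen' set, appending each unseen key; B instead computes the new keys as a set difference (set(stream) - set(base)) and recovers the required order by sorting them by their first-occurrence index in the stream - no seen set, no conditional append loop.
import Mathlib
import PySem

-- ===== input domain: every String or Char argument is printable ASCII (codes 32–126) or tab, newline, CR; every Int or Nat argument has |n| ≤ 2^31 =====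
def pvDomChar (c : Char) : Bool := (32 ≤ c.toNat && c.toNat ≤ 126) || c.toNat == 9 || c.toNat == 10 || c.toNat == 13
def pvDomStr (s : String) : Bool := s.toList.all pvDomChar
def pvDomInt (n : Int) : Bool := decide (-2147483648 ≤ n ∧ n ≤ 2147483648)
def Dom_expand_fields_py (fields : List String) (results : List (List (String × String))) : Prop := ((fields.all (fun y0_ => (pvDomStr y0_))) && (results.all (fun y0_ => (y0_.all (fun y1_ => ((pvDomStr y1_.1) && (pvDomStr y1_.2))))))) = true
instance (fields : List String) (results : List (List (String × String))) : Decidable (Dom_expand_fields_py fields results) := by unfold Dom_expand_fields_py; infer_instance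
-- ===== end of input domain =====

-- B replaces A's scan-with-seen-set by a set difference (set of all keys minus the non-'*'
-- fields) whose elements are then ordered by sorting on their first-occurrence index in the
-- key stream (alternative algorithm; same result, not claimed faster).

-- ===== PORT A =====
-- Python dict iteration over an item yields its keys, first occurrence first:
-- item.keys() on the assoc-list model is PySem.List.dedup of the first components.
def expand_fields_py (fields : List String) (results : List (List (String × String))) : List String :=
  if "*" ∉ fields then fields
  else
    let expanded := fields.filter (fun field => !(field == "*"))
    let seen : PySem.Set String := PySem.Set.ofList expanded
    let final := results.foldl
      (fun (st : List String × PySem.Set String) item =>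
        (PySem.List.dedup (item.map Prod.fst)).foldl
          (fun (st : List String × PySem.Set String) key =>
            if !(st.2.contains key) then (st.1 ++ [key], PySem.Set.add st.2 key) else st)
          st)
      (expanded, seen)
    final.1

-- ===== PORT B =====
-- stream = [key for item in results for key in item]  (dict iteration = keys, dedup'd per item);
-- new_keys = set(stream) - set(base); sorted(new_keys, key=stream.index) — the key
-- stream.index is injective on new_keys (⊆ stream), so the set's iteration order is immaterial.
-- stream.index never raises here (every sorted element is in stream): ported as index?.getD 0.
def expand_fields_py_alt (fields : List String) (results : List (List (String × String))) : List String :=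
  if "*" ∉ fields then fields
  else
    let base := fields.filter (fun field => !(field == "*"))
    let stream := results.flatMap (fun item => PySem.List.dedup (item.map Prod.fst))
    let new_keys := PySem.Set.diff (PySem.Set.ofList stream) (PySem.Set.ofList base)
    base ++ PySem.List.sorted new_keys (fun key => (PySem.List.index? stream key).getD 0) false

-- ===== PRECONDITION & SPEC =====
def Spec_expand_fields_py (fields : List String) (results : List (List (String × String))) (out : List String) : Prop := out = expand_fields_py_alt fields results
instance (fields : List String) (results : List (List (String × String))) (out : List String) : Decidable (Spec_expand_fields_py fields results out) := by unfold Spec_expand_fields_py; infer_instance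

-- ===== CLAIM (what is proved, stated in full; the proofs are below) =====
def Claim_equal_expand_fields_py : Prop := ∀ (fields : List String) (results : List (List (String × String))), Dom_expand_fields_py fields results → Spec_expand_fields_py fields results (expand_fields_py fields results)

-- ===== LEMMAS AND PROOFS =====

-- first-occurrence dedup of ks relative to an already-seen set s (proof-only scaffold:
-- the common characterisation both ports are reduced to)
def dedupNew (ks : List String) (s : PySem.Set String) : List String :=
  match ks with
  | [] => []
  | k :: ks => if s.contains k then dedupNew ks s else k :: dedupNew ks (PySem.Set.add s k)

theorem set_contains_eq (s : PySem.Set String) (x : String) : s.contains x = decide (x ∈ s) := by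
  simp [PySem.Set.contains]

theorem add_of_contains (s : PySem.Set String) (k : String) (h : s.contains k = true) :
    PySem.Set.add s k = s := by
  have hk : k ∈ s := by simpa [PySem.Set.contains] using h
  simp [PySem.Set.add, PySem.Set.contains, hk]

theorem add_of_not_contains (s : PySem.Set String) (k : String) (h : s.contains k = false) :
    PySem.Set.add s k = s ++ [k] := by
  have hk : k ∉ s := by simpa [PySem.Set.contains] using h
  simp [PySem.Set.add, PySem.Set.contains, hk]

theorem contains_add_eq (s : PySem.Set String) (k x : String) :
    (PySem.Set.add s k).contains x = (decide (x = k) || s.contains x) := by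
  by_cases h : s.contains k = true
  · rw [add_of_contains s k h]
    by_cases hx : x = k
    · subst hx; rw [h]; simp
    · simp [hx]
  · have h' : s.contains k = false := by simpa using h
    rw [add_of_not_contains s k h', set_contains_eq, set_contains_eq]
    simp [List.mem_append, Bool.or_comm]

theorem dedupNew_cons_mem (k : String) (ks : List String) (s : PySem.Set String)
    (h : s.contains k = true) : dedupNew (k :: ks) s = dedupNew ks s := by
  simp only [dedupNew]; rw [if_pos h]

theorem dedupNew_cons_not (k : String) (ks : List String) (s : PySem.Set String)
    (h : s.contains k = false) : dedupNew (k :: ks) s = k :: dedupNew ks (PySem.Set.add s k) := by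
  simp only [dedupNew]; rw [if_neg (by rw [h]; exact Bool.false_ne_true)]

-- A's inner loop, with the invariant "seen holds exactly the members of exp"
theorem foldA_eq (ks : List String) : ∀ (exp : List String) (seen : PySem.Set String),
    (∀ x, seen.contains x = decide (x ∈ exp)) →
    (ks.foldl
      (fun (st : List String × PySem.Set String) key =>
        if !(st.2.contains key) then (st.1 ++ [key], PySem.Set.add st.2 key) else st)
      (exp, seen)).1 = exp ++ dedupNew ks seen := by
  induction ks with
  | nil => intro exp seen _; simp [dedupNew]
  | cons k ks ih =>
    intro exp seen hinv
    by_cases h : seen.contains k = true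
    · rw [List.foldl_cons, dedupNew_cons_mem k ks seen h]
      simp only [h, Bool.not_true, Bool.false_eq_true, if_false]
      exact ih exp seen hinv
    · have h' : seen.contains k = false := by simpa using h
      rw [List.foldl_cons, dedupNew_cons_not k ks seen h']
      simp only [h', Bool.not_false, if_true]
      have hinv' : ∀ x, (PySem.Set.add seen k).contains x = decide (x ∈ exp ++ [k]) := by
        intro x
        rw [contains_add_eq, hinv x]
        simp [List.mem_append, Bool.or_comm]
      rw [ih (exp ++ [k]) _ hinv']
      simp [List.append_assoc]

-- membership in dedupNew: exactly the stream members not already seen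
theorem mem_dedupNew (ks : List String) : ∀ (s : PySem.Set String) (x : String),
    x ∈ dedupNew ks s ↔ x ∈ ks ∧ s.contains x = false := by
  induction ks with
  | nil => intro s x; simp [dedupNew]
  | cons k ks ih =>
    intro s x
    by_cases h : s.contains k = true
    · rw [dedupNew_cons_mem k ks s h, ih s x]
      constructor
      · rintro ⟨hx, hc⟩
        exact ⟨List.mem_cons_of_mem _ hx, hc⟩
      · rintro ⟨hx, hc⟩
        rcases List.mem_cons.mp hx with rfl | hx
        · rw [h] at hc; exact absurd hc (by simp)
        · exact ⟨hx, hc⟩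
    · have h' : s.contains k = false := by simpa using h
      rw [dedupNew_cons_not k ks s h']
      constructor
      · intro hx
        rcases List.mem_cons.mp hx with rfl | hx
        · exact ⟨List.mem_cons_self, h'⟩
        · rcases (ih _ x).mp hx with ⟨hxs, hc⟩
          rw [contains_add_eq] at hc
          rcases Bool.or_eq_false_iff.mp hc with ⟨_, hc2⟩
          exact ⟨List.mem_cons_of_mem _ hxs, hc2⟩
      · rintro ⟨hx, hc⟩
        rcases List.mem_cons.mp hx with rfl | hx
        · exact List.mem_cons_self
        · by_cases hxk : x = k
          · subst hxk; exact List.mem_cons_self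
          · refine List.mem_cons_of_mem _ ((ih _ x).mpr ⟨hx, ?_⟩)
            rw [contains_add_eq, hc]
            simp [hxk]

theorem nodup_dedupNew (ks : List String) : ∀ (s : PySem.Set String), (dedupNew ks s).Nodup := by
  induction ks with
  | nil => intro s; simp [dedupNew]
  | cons k ks ih =>
    intro s
    by_cases h : s.contains k = true
    · rw [dedupNew_cons_mem k ks s h]; exact ih s
    · have h' : s.contains k = false := by simpa using h
      rw [dedupNew_cons_not k ks s h']
      refine List.Nodup.cons ?_ (ih _)
      intro hk
      rcases (mem_dedupNew ks _ k).mp hk with ⟨_, hc⟩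
      rw [contains_add_eq] at hc
      simp at hc

-- the sort key of B: first-occurrence index in the stream
theorem key_cons_of_ne (k x : String) (ks : List String) (hne : x ≠ k) (hx : x ∈ ks) :
    (PySem.List.index? (k :: ks) x).getD 0 = (PySem.List.index? ks x).getD 0 + 1 := by
  rw [PySem.List.index?_cons_of_ne ks (fun h => hne h.symm)]
  rcases Option.isSome_iff_exists.mp ((PySem.List.index?_isSome_iff ks x).mpr hx) with ⟨n, hn⟩
  rw [hn]; rfl

-- dedupNew lists its elements in strictly increasing first-occurrence order
theorem pairwise_dedupNew (ks : List String) : ∀ (s : PySem.Set String),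
    (dedupNew ks s).Pairwise
      (fun a b => (PySem.List.index? ks a).getD 0 < (PySem.List.index? ks b).getD 0) := by
  induction ks with
  | nil => intro s; simp [dedupNew]
  | cons k ks ih =>
    intro s
    have lift : ∀ (t : PySem.Set String), t.contains k = true →
        (dedupNew ks t).Pairwise
          (fun a b => (PySem.List.index? (k :: ks) a).getD 0 < (PySem.List.index? (k :: ks) b).getD 0) := by
      intro t ht
      refine (ih t).imp_of_mem ?_
      intro a b ha hb hab
      rcases (mem_dedupNew ks t a).mp ha with ⟨has, hca⟩
      rcases (mem_dedupNew ks t b).mp hb with ⟨hbs, hcb⟩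
      have hak : a ≠ k := fun h => by rw [h, ht] at hca; cases hca
      have hbk : b ≠ k := fun h => by rw [h, ht] at hcb; cases hcb
      rw [key_cons_of_ne k a ks hak has, key_cons_of_ne k b ks hbk hbs]
      omega
    by_cases h : s.contains k = true
    · rw [dedupNew_cons_mem k ks s h]
      exact lift s h
    · have h' : s.contains k = false := by simpa using h
      rw [dedupNew_cons_not k ks s h']
      refine List.Pairwise.cons ?_ (lift (PySem.Set.add s k) ?_)
      · intro b hb
        rcases (mem_dedupNew ks _ b).mp hb with ⟨hbs, hcb⟩
        have hbk : b ≠ k := by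
          intro hh; rw [hh, contains_add_eq] at hcb; simp at hcb
        rw [key_cons_of_ne k b ks hbk hbs, PySem.List.index?_cons_self]
        simp
      · rw [contains_add_eq]; simp

-- ===== VERDICT (by name: the statement is the Claim_ definition above) =====
theorem expand_fields_py_spec : Claim_equal_expand_fields_py := by
  intro fields results _
  unfold Spec_expand_fields_py expand_fields_py expand_fields_py_alt
  by_cases hstar : "*" ∉ fields
  · simp [hstar]
  · simp only [hstar, reduceIte]
    set base := fields.filter (fun field => !(field == "*")) with hbase
    set ks := results.flatMap (fun item => PySem.List.dedup (item.map Prod.fst)) with hks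
    have hA : (results.foldl
        (fun (st : List String × PySem.Set String) item =>
          (PySem.List.dedup (item.map Prod.fst)).foldl
            (fun (st : List String × PySem.Set String) key =>
              if !(st.2.contains key) then (st.1 ++ [key], PySem.Set.add st.2 key) else st)
            st)
        (base, PySem.Set.ofList base)).1 = base ++ dedupNew ks (PySem.Set.ofList base) := by
      rw [← List.foldl_flatMap]
      refine foldA_eq ks base (PySem.Set.ofList base) ?_
      intro x
      simp [PySem.Set.contains, PySem.Set.mem_ofList]
    rw [hA]
    congr 1
    refine Eq.symm (PySem.List.sorted_eq_of_perm_of_pairwise_lt _ _ _ ?_ ?_)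
    · -- dedupNew ks (ofList base) is a permutation of set(ks) - set(base)
      refine (List.perm_ext_iff_of_nodup (nodup_dedupNew ks _) (PySem.Set.nodup_diff _ _ (PySem.Set.nodup_ofList ks))).mpr ?_
      intro x
      rw [mem_dedupNew, PySem.Set.mem_diff]
      simp [PySem.Set.mem_ofList]
    · exact pairwise_dedupNew ks (PySem.Set.ofList base)
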